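-- pv_equiv track=rewrite | github.com/Apfelwurm/open-cisco-mpp-provisioning | app.py | build_merged_config
-- ===== SOURCE A (Python) =====
-- def build_merged_config(phone_config, common_config, schema_config):
--     """Build merged configuration using same logic as comparison"""
--     merged_config = {}
--
--     # Start with common config (actual values we want to set)
--     if common_config:
--         for key, value in common_config.items():
--             merged_config[key] = value
--
--     # Apply phone-specific config (overrides common)
--     if phone_config:
--         for key, value in phone_config.items():
--             if key not in ['mac', 'ip_address', 'serial_number']:  # Skip non-Cisco parameters
--                 merged_config[key] = value
--
--     # Add any missing schema parameters with empty values (no defaults)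
--     # This ensures all schema parameters are present in XML but without unwanted default values
--     flat_profile_params = schema_config.get('flat_profile_params', {})
--     for param in flat_profile_params.keys():
--         if param not in merged_config:
--             merged_config[param] = ""  # Empty value, not the schema default
--
--     return merged_config
-- ===== SOURCE B (Python) =====
-- def build_merged_config(phone_config, common_config, schema_config):
--     """Key-schedule + pure resolver: fix the output key order once (ordered dedup
--     of the override stream's keys followed by the schema params), then compute each
--     value independently by scanning the override stream backwards (last write wins);
--     no dict is ever mutated."""
--     skip = ('mac', 'ip_address', 'serial_number')
--     events = [(k, v) for k, v in (common_config or {}).items()]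
--     events += [(k, v) for k, v in (phone_config or {}).items() if k not in skip]
--     order = dict.fromkeys([k for k, _ in events]
--                           + list(schema_config.get('flat_profile_params', {})))
--
--     def resolve(key):
--         for k, v in reversed(events):
--             if k == key:
--                 return v
--         return ""
--
--     return {key: resolve(key) for key in order}
-- ===== Notes on version B (the rewrite author's own statement) =====
-- stated objective: alternative
-- what changed: A builds the result by mutating one dict in three passes (overwrite with common, overwrite with filtered phone, insert-if-missing schema defaults); B never merges or mutates: it fixes the output key order once as an ordered dedup of the override stream's keys plus the schema params, then computes every value independently by scanning the override stream backwards for the last write ("" if none).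
import Mathlib
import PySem

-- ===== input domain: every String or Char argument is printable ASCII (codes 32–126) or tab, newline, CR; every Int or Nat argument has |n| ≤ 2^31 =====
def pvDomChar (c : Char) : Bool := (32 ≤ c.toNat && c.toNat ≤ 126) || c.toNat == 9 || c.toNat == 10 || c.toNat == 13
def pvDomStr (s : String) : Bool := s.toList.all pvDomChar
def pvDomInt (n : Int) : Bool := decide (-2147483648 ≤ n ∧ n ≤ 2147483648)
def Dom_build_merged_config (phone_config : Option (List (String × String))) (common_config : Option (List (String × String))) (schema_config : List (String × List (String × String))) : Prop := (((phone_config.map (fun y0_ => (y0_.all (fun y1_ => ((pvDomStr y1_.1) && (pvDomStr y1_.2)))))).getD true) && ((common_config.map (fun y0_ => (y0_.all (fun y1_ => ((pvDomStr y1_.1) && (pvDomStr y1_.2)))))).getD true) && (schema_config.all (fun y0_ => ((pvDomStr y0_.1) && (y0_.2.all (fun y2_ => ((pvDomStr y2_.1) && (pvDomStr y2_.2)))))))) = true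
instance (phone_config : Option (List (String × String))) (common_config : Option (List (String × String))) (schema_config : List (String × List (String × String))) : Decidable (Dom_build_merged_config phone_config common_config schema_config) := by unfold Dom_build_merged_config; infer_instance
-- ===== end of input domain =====

-- B fixes the output key order once (ordered dedup of the override stream's keys ++ schema params) and computes each value by a backwards scan of the override stream, instead of A's three mutating dict passes; same return value proved (objective: alternative).


-- ===== PORT A =====
def build_merged_config (phone_config : Option (List (String × String))) (common_config : Option (List (String × String))) (schema_config : List (String × List (String × String))) : List (String × String) :=
  let merged : PySem.Dict String String := PySem.Dict.empty
  -- if common_config: for key, value in common_config.items(): merged_config[key] = value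
  let merged := match common_config with
    | none => merged
    | some l => if l.isEmpty then merged else l.foldl (fun (d : PySem.Dict String String) (p : String × String) => d.insert p.1 p.2) merged
  -- if phone_config: for key, value ...: if key not in ['mac','ip_address','serial_number']: merged_config[key] = value
  let merged := match phone_config with
    | none => merged
    | some l => if l.isEmpty then merged else
        l.foldl (fun (d : PySem.Dict String String) (p : String × String) => if p.1 ∉ ["mac", "ip_address", "serial_number"] then d.insert p.1 p.2 else d) merged
  -- flat_profile_params = schema_config.get('flat_profile_params', {}); for param in flat_profile_params.keys(): add "" if missing
  let flat_profile_params := (PySem.Dict.ofList schema_config).getD "flat_profile_params" []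
  let merged := (PySem.Dict.ofList flat_profile_params).keys.foldl
      (fun d param => if d.contains param then d else d.insert param "") merged
  merged.items

-- ===== PORT B =====
def bmcSkip : List String := ["mac", "ip_address", "serial_number"]

-- resolve(key): scan the event stream backwards, first hit wins; "" if no event mentions the key
def bmcResolve (events : List (String × String)) (key : String) : String :=
  match events.reverse.find? (fun p => p.1 == key) with
  | some p => p.2
  | none => ""

def build_merged_config_alt (phone_config : Option (List (String × String))) (common_config : Option (List (String × String))) (schema_config : List (String × List (String × String))) : List (String × String) :=
  let events := (PySem.Dict.ofList (common_config.getD [])).items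
  let events := events ++ (PySem.Dict.ofList (phone_config.getD [])).items.filter (fun p => p.1 ∉ bmcSkip)
  -- order = dict.fromkeys(event keys ++ schema param keys)  (ordered dedup)
  let order := PySem.List.dedup (events.map (·.1)
      ++ (PySem.Dict.ofList ((PySem.Dict.ofList schema_config).getD "flat_profile_params" [])).keys)
  order.map (fun key => (key, bmcResolve events key))

-- ===== PRECONDITION & SPEC =====
def Spec_build_merged_config (phone_config : Option (List (String × String))) (common_config : Option (List (String × String))) (schema_config : List (String × List (String × String))) (out : List (String × String)) : Prop := out = build_merged_config_alt phone_config common_config schema_config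
instance (phone_config : Option (List (String × String))) (common_config : Option (List (String × String))) (schema_config : List (String × List (String × String))) (out : List (String × String)) : Decidable (Spec_build_merged_config phone_config common_config schema_config out) := by unfold Spec_build_merged_config; infer_instance

-- ===== CLAIM (what is proved, stated in full; the proofs are below) =====
def Claim_equal_build_merged_config : Prop := ∀ (phone_config : Option (List (String × String))) (common_config : Option (List (String × String))) (schema_config : List (String × List (String × String))), Dom_build_merged_config phone_config common_config schema_config → Spec_build_merged_config phone_config common_config schema_config (build_merged_config phone_config common_config schema_config)

-- ===== LEMMAS AND PROOFS =====
def pvIns (d : PySem.Dict String String) (l : List (String × String)) : PySem.Dict String String :=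
  l.foldl (fun d p => d.insert p.1 p.2) d

theorem pvIns_append (d : PySem.Dict String String) (l : List (String × String)) (p : String × String) :
    pvIns d (l ++ [p]) = (pvIns d l).insert p.1 p.2 := by
  simp [pvIns]

theorem pvIns_cons (d : PySem.Dict String String) (p : String × String) (l : List (String × String)) :
    pvIns d (p :: l) = pvIns (d.insert p.1 p.2) l := rfl

theorem pv_get?_pvIns (l : List (String × String)) (d : PySem.Dict String String) (k : String) :
    (pvIns d l).get? k = ((pvIns PySem.Dict.empty l).get? k).or (d.get? k) := by
  induction l using List.reverseRecOn with
  | nil => simp [pvIns, PySem.Dict.get?_empty]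
  | append_singleton l p ih =>
    rw [pvIns_append, pvIns_append, PySem.Dict.get?_insert, PySem.Dict.get?_insert]
    split
    · simp
    · rw [ih]

theorem pv_keys_pvIns (d : PySem.Dict String String) (l : List (String × String)) :
    (pvIns d l).keys = PySem.Set.update d.keys (l.map Prod.fst) := by
  exact PySem.Dict.keys_foldl_insert_key l Prod.fst (fun _ p => p.2) d

theorem pv_nodup_keys_pvIns (d : PySem.Dict String String) (l : List (String × String))
    (h : d.keys.Nodup) : (pvIns d l).keys.Nodup := by
  exact PySem.Dict.nodup_keys_foldl_insert_key l Prod.fst (fun _ p => p.2) d h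

theorem pvFA (c : String → Bool) (x : String) (l : List String) (hx : c x = true) :
    List.filter (fun y => !c y) ((PySem.Set.ofList (x :: l)))
      = List.filter (fun y => !c y) (PySem.Set.ofList l) := by
  rw [PySem.Set.ofList_cons, List.filter_cons_of_neg (by simp [hx])]
  show List.filter _ (List.filter _ _) = _
  rw [List.filter_filter]
  apply List.filter_congr
  intro y _
  by_cases h : y = x
  · subst h; simp [hx]
  · simp [h]

theorem pvAddMissing (ks : List String) (d : PySem.Dict String String) :
    (ks.foldl (fun d k => if d.contains k then d else d.insert k "") d).items
      = d.items ++ ((PySem.Set.ofList ks).filter (fun k => !(d.contains k))).map (fun k => (k, "")) := by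
  induction ks generalizing d with
  | nil => simp [PySem.Set.ofList]
  | cons k ks ih =>
    rw [List.foldl_cons]
    by_cases h : d.contains k = true
    · rw [if_pos h, ih, pvFA _ _ _ h]
    · rw [if_neg (by simp [h]), ih,
        PySem.Dict.items_insert_of_not_contains _ "" (by simpa using h)]
      rw [PySem.Set.ofList_cons, List.filter_cons_of_pos (by simp [h]), List.map_cons,
        List.append_assoc, List.singleton_append]
      show _ = _ ++ ((k, "") :: (List.filter _ (List.filter _ _)).map _)
      rw [List.filter_filter]
      refine congrArg₂ _ rfl (congrArg₂ _ rfl (congrArg (List.map (fun k => (k, ""))) (List.filter_congr ?_)))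
      intro y _
      simp [PySem.Dict.contains_insert, Bool.not_or, Bool.and_comm]

theorem pvFilterIf (l : List (String × String)) (d : PySem.Dict String String) :
    l.foldl (fun d p => if p.1 ∉ ["mac", "ip_address", "serial_number"] then d.insert p.1 p.2 else d) d
      = pvIns d (l.filter (fun p => p.1 ∉ ["mac", "ip_address", "serial_number"])) := by
  induction l generalizing d with
  | nil => rfl
  | cons p l ih =>
    by_cases h : p.1 ∈ ["mac", "ip_address", "serial_number"]
    · rw [List.foldl_cons, if_neg (by simp [h]), List.filter_cons_of_neg (by simp [h]), ih]
    · rw [List.foldl_cons, if_pos h, List.filter_cons_of_pos (by simp [h]), pvIns_cons, ih]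

theorem pvA_norm (phone_config common_config : Option (List (String × String)))
    (schema_config : List (String × List (String × String))) :
    build_merged_config phone_config common_config schema_config
      = ((PySem.Dict.ofList ((PySem.Dict.ofList schema_config).getD "flat_profile_params" [])).keys.foldl
          (fun d param => if d.contains param then d else d.insert param "")
          (pvIns (pvIns PySem.Dict.empty (common_config.getD []))
            ((phone_config.getD []).filter
              (fun p => p.1 ∉ ["mac", "ip_address", "serial_number"])))).items := by
  cases common_config with
  | none =>
    cases phone_config with
    | none => rfl
    | some lp => cases lp with
      | nil => rfl
      | cons q lp =>
        simp only [build_merged_config]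
        rw [pvFilterIf]
        rfl
  | some lc => cases lc with
    | nil =>
      cases phone_config with
      | none => rfl
      | some lp => cases lp with
        | nil => rfl
        | cons q lp =>
          simp only [build_merged_config]
          rw [pvFilterIf]
          rfl
    | cons c lc =>
      cases phone_config with
      | none => rfl
      | some lp => cases lp with
        | nil => rfl
        | cons q lp =>
          simp only [build_merged_config]
          rw [pvFilterIf]
          rfl

-- find? on the reverse of a unique-key pair list is find? on the list itself
theorem pvFindRev (l : List (String × String)) (k : String) (h : (l.map Prod.fst).Nodup) :
    l.reverse.find? (fun p => p.1 == k) = l.find? (fun p => p.1 == k) := by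
  induction l with
  | nil => rfl
  | cons p l ih =>
    rw [List.map_cons, List.nodup_cons] at h
    obtain ⟨hp, hl⟩ := h
    rw [List.reverse_cons, List.find?_append]
    by_cases hpk : p.1 = k
    · have hnone : l.reverse.find? (fun q => q.1 == k) = none := by
        rw [List.find?_eq_none]
        intro q hq
        simp only [beq_iff_eq]
        intro hqk
        exact hp (by rw [hpk, ← hqk]; exact List.mem_map_of_mem (List.mem_reverse.mp hq))
      rw [hnone, List.find?_cons_of_pos (by simp [hpk])]
      simp [hpk]
    · rw [ih hl, List.find?_cons_of_neg (by simp [hpk])]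
      simp [hpk]

-- find? survives a filter whose predicate is implied by the search predicate
theorem pvFindFilter (l : List (String × String)) (p q : String × String → Bool)
    (h : ∀ x, p x = true → q x = true) :
    (l.filter q).find? p = l.find? p := by
  induction l with
  | nil => rfl
  | cons x l ih =>
    by_cases hq : q x = true
    · rw [List.filter_cons_of_pos hq]
      by_cases hp : p x = true
      · rw [List.find?_cons_of_pos hp, List.find?_cons_of_pos hp]
      · rw [List.find?_cons_of_neg (by simp [hp]), List.find?_cons_of_neg (by simp [hp]), ih]
    · rw [List.filter_cons_of_neg (by simp [hq]), ih,
        List.find?_cons_of_neg (fun hp => hq (h x hp))]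

-- a filter by key does not change lookups at keys the filter keeps
theorem pvGetFilter (l : List (String × String)) (q : String × String → Bool) (k : String)
    (h : ∀ p : String × String, p.1 = k → q p = true) :
    (pvIns PySem.Dict.empty (l.filter q)).get? k = (pvIns PySem.Dict.empty l).get? k := by
  induction l with
  | nil => rfl
  | cons p l ih =>
    by_cases hq : q p = true
    · rw [List.filter_cons_of_pos hq, pvIns_cons, pvIns_cons,
        pv_get?_pvIns l, pv_get?_pvIns (l.filter q), ih]
    · have hpk : p.1 ≠ k := fun he => hq (h p he)
      rw [List.filter_cons_of_neg (by simp [hq]), pvIns_cons,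
        pv_get?_pvIns l, PySem.Dict.get?_insert_of_ne _ _ (Ne.symm hpk),
        PySem.Dict.get?_empty, Option.or_none, ih]

theorem pvOfListFilter (l : List String) (q : String → Bool) :
    PySem.Set.ofList (l.filter q) = (PySem.Set.ofList l).filter q := by
  induction l using List.reverseRecOn with
  | nil => rfl
  | append_singleton l x ih =>
    rw [List.filter_append, PySem.Set.ofList_append_singleton, PySem.Set.add_eq_ite]
    by_cases hq : q x = true
    · rw [List.filter_cons_of_pos hq, List.filter_nil,
        PySem.Set.ofList_append_singleton, PySem.Set.add_eq_ite, ih]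
      by_cases hx : x ∈ PySem.Set.ofList l
      · rw [if_pos hx, if_pos (List.mem_filter.mpr ⟨hx, hq⟩)]
      · rw [if_neg hx, if_neg (fun hc => hx (List.mem_filter.mp hc).1),
          List.filter_append, List.filter_cons_of_pos hq, List.filter_nil]
    · rw [List.filter_cons_of_neg (by simp [hq]), List.filter_nil, List.append_nil, ih]
      by_cases hx : x ∈ PySem.Set.ofList l
      · rw [if_pos hx]
      · rw [if_neg hx, List.filter_append, List.filter_cons_of_neg (by simp [hq]),
          List.filter_nil, List.append_nil]

theorem pvMatchSnd (o : Option (String × String)) :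
    (match o with | some p => p.2 | none => "") = (o.map (·.2)).getD "" := by
  cases o <;> rfl

theorem pvOrMap (a b : Option (String × String)) (f : String × String → String) :
    (a.or b).map f = (a.map f).or (b.map f) := by
  cases a <;> rfl

-- the resolver computes exactly the lookup in A's dict after the two override passes
theorem pvResolve (ccl pcl : List (String × String)) (k : String) :
    bmcResolve ((pvIns PySem.Dict.empty ccl).items
        ++ ((pvIns PySem.Dict.empty pcl).items.filter (fun p => p.1 ∉ bmcSkip))) k
      = (pvIns (pvIns PySem.Dict.empty ccl)
          (pcl.filter (fun p => p.1 ∉ bmcSkip))).getD k "" := by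
  set C := pvIns PySem.Dict.empty ccl with hC
  set P := pvIns PySem.Dict.empty pcl with hP
  have hCnd : C.keys.Nodup := pv_nodup_keys_pvIns _ _ List.nodup_nil
  have hPnd : P.keys.Nodup := pv_nodup_keys_pvIns _ _ List.nodup_nil
  have hFnd : ((P.items.filter (fun p => p.1 ∉ bmcSkip)).map Prod.fst).Nodup :=
    hPnd.sublist (List.Sublist.map Prod.fst List.filter_sublist)
  rw [bmcResolve, List.reverse_append, List.find?_append,
    pvFindRev _ _ hFnd, pvFindRev _ _ hCnd, pvMatchSnd, pvOrMap]
  have hCd : (C.items.find? (fun p => p.1 == k)).map (·.2) = C.get? k := rfl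
  have hPf : ((P.items.filter (fun p => p.1 ∉ bmcSkip)).find? (fun p => p.1 == k)).map (·.2)
      = (pvIns PySem.Dict.empty (pcl.filter (fun p => p.1 ∉ bmcSkip))).get? k := by
    by_cases hk : k ∈ bmcSkip
    · have h1 : (P.items.filter (fun p => p.1 ∉ bmcSkip)).find? (fun p => p.1 == k) = none := by
        rw [List.find?_eq_none]
        intro q hq
        have hq2 : (decide (q.1 ∉ bmcSkip)) = true := (List.mem_filter.mp hq).2
        simp only [beq_iff_eq]
        intro he
        rw [decide_eq_true_iff] at hq2
        exact hq2 (he ▸ hk)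
      have h2 : (pvIns PySem.Dict.empty (pcl.filter (fun p => p.1 ∉ bmcSkip))).get? k = none := by
        rw [PySem.Dict.get?_eq_none_iff_not_mem_keys, pv_keys_pvIns]
        intro hmem
        rw [PySem.Dict.keys_empty] at hmem
        rcases (PySem.Set.mem_update PySem.Set.empty _ k).mp hmem with h | h
        · cases h
        · obtain ⟨p, hp, hpk⟩ := List.mem_map.mp h
          have hp2 : (decide (p.1 ∉ bmcSkip)) = true := (List.mem_filter.mp hp).2
          rw [decide_eq_true_iff] at hp2
          exact hp2 (hpk ▸ hk)
      rw [h1, h2]; rfl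
    · rw [pvFindFilter _ _ _ (fun x hx => by
        simp only [beq_iff_eq] at hx
        simp [hx, hk])]
      rw [show ((P.items.find? (fun p => p.1 == k)).map (·.2)) = P.get? k from rfl, hP]
      exact (pvGetFilter pcl _ k (fun p hp => by simp [hp, hk])).symm
  rw [hCd, hPf, ← pv_get?_pvIns, PySem.Dict.getD_eq_get?_getD]

-- B's deduplicated key schedule is exactly the key list of A's final dict
theorem pvOrder (ccl pcl : List (String × String)) :
    PySem.Set.ofList (((pvIns PySem.Dict.empty ccl).items
        ++ ((pvIns PySem.Dict.empty pcl).items.filter (fun p => p.1 ∉ bmcSkip))).map (·.1))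
      = (pvIns (pvIns PySem.Dict.empty ccl) (pcl.filter (fun p => p.1 ∉ bmcSkip))).keys := by
  set C := pvIns PySem.Dict.empty ccl with hC
  set P := pvIns PySem.Dict.empty pcl with hP
  have hCnd : C.keys.Nodup := pv_nodup_keys_pvIns _ _ List.nodup_nil
  have hq : (fun p : String × String => decide (p.1 ∉ bmcSkip))
      = (fun k : String => decide (k ∉ bmcSkip)) ∘ Prod.fst := rfl
  have hmapfilter : ∀ (l : List (String × String)),
      (l.filter (fun p => p.1 ∉ bmcSkip)).map Prod.fst
        = (l.map Prod.fst).filter (fun k => k ∉ bmcSkip) := by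
    intro l
    rw [List.filter_map, hq]
  have hPkeys : P.keys = PySem.Set.ofList (pcl.map Prod.fst) := by
    rw [hP, pv_keys_pvIns]; rfl
  have hsame : PySem.Set.ofList ((P.items.filter (fun p => p.1 ∉ bmcSkip)).map Prod.fst)
      = PySem.Set.ofList ((pcl.filter (fun p => p.1 ∉ bmcSkip)).map Prod.fst) := by
    rw [hmapfilter, hmapfilter]
    show PySem.Set.ofList ((P.keys).filter _) = _
    rw [hPkeys, ← pvOfListFilter, PySem.Set.ofList_ofList, pvOfListFilter, ← pvOfListFilter]
  calc PySem.Set.ofList ((C.items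
          ++ (P.items.filter (fun p => p.1 ∉ bmcSkip))).map (·.1))
      = PySem.Set.update (PySem.Set.ofList C.keys)
          ((P.items.filter (fun p => p.1 ∉ bmcSkip)).map Prod.fst) := by
        rw [List.map_append, PySem.Set.ofList_append]; rfl
    _ = C.keys ++ (PySem.Set.ofList ((P.items.filter (fun p => p.1 ∉ bmcSkip)).map Prod.fst)).filter
          (fun y => !(PySem.Set.contains C.keys y)) := by
        rw [PySem.Set.ofList_eq_self_of_nodup _ hCnd, PySem.Set.update_eq_append_filter]
    _ = C.keys ++ (PySem.Set.ofList ((pcl.filter (fun p => p.1 ∉ bmcSkip)).map Prod.fst)).filter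
          (fun y => !(PySem.Set.contains C.keys y)) := by rw [hsame]
    _ = PySem.Set.update C.keys ((pcl.filter (fun p => p.1 ∉ bmcSkip)).map Prod.fst) :=
        (PySem.Set.update_eq_append_filter _ _).symm
    _ = (pvIns C (pcl.filter (fun p => p.1 ∉ bmcSkip))).keys := (pv_keys_pvIns _ _).symm

theorem pv_core (ccl pcl : List (String × String)) (S : List String) (hS : S.Nodup) :
    (S.foldl (fun d param => if d.contains param then d else d.insert param "")
        (pvIns (pvIns PySem.Dict.empty ccl) (pcl.filter (fun p => p.1 ∉ bmcSkip)))).items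
      = (PySem.List.dedup
            (((pvIns PySem.Dict.empty ccl).items
              ++ ((pvIns PySem.Dict.empty pcl).items.filter (fun p => p.1 ∉ bmcSkip))).map (·.1) ++ S)).map
          (fun key => (key, bmcResolve ((pvIns PySem.Dict.empty ccl).items
              ++ ((pvIns PySem.Dict.empty pcl).items.filter (fun p => p.1 ∉ bmcSkip))) key)) := by
  set D2 := pvIns (pvIns PySem.Dict.empty ccl) (pcl.filter (fun p => p.1 ∉ bmcSkip)) with hD2
  have hD2nd : D2.keys.Nodup :=
    pv_nodup_keys_pvIns _ _ (pv_nodup_keys_pvIns _ _ List.nodup_nil)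
  -- the deduplicated schedule
  have horder : PySem.List.dedup
      (((pvIns PySem.Dict.empty ccl).items
        ++ ((pvIns PySem.Dict.empty pcl).items.filter (fun p => p.1 ∉ bmcSkip))).map (·.1) ++ S)
      = D2.keys ++ S.filter (fun k => !(D2.contains k)) := by
    show PySem.Set.ofList _ = _
    rw [PySem.Set.ofList_append, pvOrder, PySem.Set.update_eq_append_filter,
      PySem.Set.ofList_eq_self_of_nodup _ hS]
    refine congrArg₂ _ rfl (List.filter_congr ?_)
    intro k _
    have hcb : PySem.Set.contains D2.keys k = D2.contains k := by
      rw [Bool.eq_iff_iff, PySem.Set.contains_iff, PySem.Dict.contains_iff_mem_keys]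
    rw [← hD2, hcb]
  -- A's fold yields items = D2.items ++ fresh schema pairs
  have hM := pvAddMissing S D2
  rw [PySem.Set.ofList_eq_self_of_nodup _ hS] at hM
  set M := S.foldl (fun d param => if d.contains param then d else d.insert param "") D2 with hMdef
  have hMkeys : M.keys = D2.keys ++ S.filter (fun k => !(D2.contains k)) := by
    show M.items.map Prod.fst = _
    rw [hM, List.map_append, List.map_map]
    refine congrArg₂ _ rfl ?_
    rw [show (Prod.fst ∘ fun k : String => (k, "")) = id from rfl, List.map_id]
  have hMnd : M.keys.Nodup := by
    rw [hMkeys, List.nodup_append]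
    refine ⟨hD2nd, hS.filter _, ?_⟩
    intro a ha b hb hab
    have hb2 := (List.mem_filter.mp hb).2
    subst hab
    rw [← PySem.Dict.contains_iff_mem_keys] at ha
    rw [ha] at hb2
    cases hb2
  -- assemble
  rw [horder, ← hMkeys, PySem.Dict.items_eq_map_keys M hMnd ""]
  apply List.map_congr_left
  intro k hk
  rw [pvResolve]
  refine congrArg _ ?_
  -- M.getD k "" = D2.getD k "" for k ∈ M.keys
  rw [hMkeys, List.mem_append] at hk
  rcases hk with hk | hk
  · rcases ho : D2.get? k with _ | v
    · exact absurd ((PySem.Dict.get?_eq_none_iff_not_mem_keys D2 k).mp ho) (by simp [hk])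
    · have hmem : (k, v) ∈ M.items := by
        rw [hM, List.mem_append]
        exact Or.inl (PySem.Dict.mem_items_of_get?_eq_some D2 ho)
      rw [PySem.Dict.getD_of_mem_items M hmem hMnd "", PySem.Dict.getD_eq_get?_getD, ho]
      rfl
  · have hnc := (List.mem_filter.mp hk).2
    rw [Bool.not_eq_eq_eq_not, Bool.not_true] at hnc
    have hmem : (k, "") ∈ M.items := by
      rw [hM, List.mem_append]
      exact Or.inr (List.mem_map.mpr ⟨k, hk, rfl⟩)
    rw [PySem.Dict.getD_of_mem_items M hmem hMnd ""]
    exact (PySem.Dict.getD_of_not_contains _ "" hnc).symm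

theorem pv_main (phone_config common_config : Option (List (String × String)))
    (schema_config : List (String × List (String × String))) :
    build_merged_config phone_config common_config schema_config
      = build_merged_config_alt phone_config common_config schema_config := by
  have h := pv_core (common_config.getD []) (phone_config.getD [])
    (PySem.Dict.ofList ((PySem.Dict.ofList schema_config).getD "flat_profile_params" [])).keys
    (PySem.Dict.nodup_keys_ofList _)
  calc build_merged_config phone_config common_config schema_config
      = _ := pvA_norm phone_config common_config schema_config
    _ = _ := h
    _ = build_merged_config_alt phone_config common_config schema_config := rfl

-- ===== VERDICT (by name: the statement is the Claim_ definition above) =====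
theorem build_merged_config_spec : Claim_equal_build_merged_config := by
  intro pc cc sc _
  unfold Spec_build_merged_config
  exact pv_main pc cc sc
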